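-- pv_equiv track=rewrite | github.com/hwright-ucsb/293s-HolyGrail | nlp/summarizer.py | rankSentences
-- ===== SOURCE A (Python) =====
-- def rankSentences(sentences):
-- 	n = len(sentences)
-- 	# n by n matrix of 0s
-- 	# which will store the word set intersection between sentences
-- 	values = [[0 for x in range(n)] for x in range(n)]
-- 	for i in range(n):
-- 		for j in range(n):
-- 			values[i][j] = calcIntersection(sentences[i],sentences[j])
--
-- 	rankings = {} # maps sentence to score, score
-- 	for i in range(n):
-- 		score = 0
-- 		for j in range(n):
-- 			if i==j:
-- 				continue
-- 			score += values[i][j]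
--
-- 		rankings[sentences[i]] = score
--
-- 	return rankings
--
-- def calcIntersection(s1, s2):
-- 	words1 = set(s1.split(' '))
-- 	words2 = set(s2.split(' '))
-- 	inter = words1.intersection(words2)
-- 	return len(inter)
-- ===== SOURCE B (Python) =====
-- def rankSentences(sentences):
--     # Precompute each sentence's word set once; score_i = sum over words w of
--     # (number of sentences containing w) - 1, which equals the summed pairwise
--     # intersection sizes without the O(n^2) pairwise pass.
--     word_sets = [set(s.split(' ')) for s in sentences]
--     df = {}
--     for ws in word_sets:
--         for w in ws:
--             df[w] = df.get(w, 0) + 1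
--     rankings = {}
--     for s, ws in zip(sentences, word_sets):
--         rankings[s] = sum(df.get(w, 0) - 1 for w in ws)
--     return rankings
-- ===== Notes on version B (the rewrite author's own statement) =====
-- stated objective: faster
-- what changed: Replaces the O(n^2) pairwise word-set-intersection matrix by a single document-frequency counter: each sentence's score is the sum over its distinct words w of (df(w) - 1).
import Mathlib
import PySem

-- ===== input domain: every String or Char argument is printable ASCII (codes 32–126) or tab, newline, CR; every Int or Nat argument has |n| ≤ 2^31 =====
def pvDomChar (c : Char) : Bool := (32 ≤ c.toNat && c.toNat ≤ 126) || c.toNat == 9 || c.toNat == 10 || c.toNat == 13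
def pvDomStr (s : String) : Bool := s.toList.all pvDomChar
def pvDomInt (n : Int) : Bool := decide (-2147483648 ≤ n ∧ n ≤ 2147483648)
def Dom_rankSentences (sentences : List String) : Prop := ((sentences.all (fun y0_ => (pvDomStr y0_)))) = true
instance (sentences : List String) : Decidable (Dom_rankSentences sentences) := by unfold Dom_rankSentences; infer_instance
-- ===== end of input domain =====

-- B replaces A's O(n^2) pairwise word-set-intersection matrix by one document-frequency
-- counter (score_i = sum over distinct words w of sentence i of df(w) - 1); objective: faster.

-- ===== PORT A =====
def calcIntersection (s1 s2 : String) : Int :=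
  let words1 : PySem.Set String := PySem.Set.ofList ((PySem.Str.split? s1 " ").getD [])
  let words2 : PySem.Set String := PySem.Set.ofList ((PySem.Str.split? s2 " ").getD [])
  let inter := PySem.Set.inter words1 words2
  PySem.Set.len inter

def rankSentences (sentences : List String) : List (String × Int) :=
  let n : Int := sentences.length
  let values : List (List Int) :=
    (PySem.List.pyRange 0 n).map (fun _ => (PySem.List.pyRange 0 n).map (fun _ => (0:Int)))
  let values := (PySem.List.pyRange 0 n).foldl (fun vals i =>
      (PySem.List.pyRange 0 n).foldl (fun vals j =>
        PySem.List.pySetD vals i (PySem.List.pySetD (PySem.List.pyGetD vals i []) j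
          (calcIntersection (PySem.List.pyGetD sentences i "") (PySem.List.pyGetD sentences j "")))) vals) values
  let rankings : PySem.Dict String Int := PySem.Dict.empty
  let rankings := (PySem.List.pyRange 0 n).foldl (fun d i =>
      let score := (PySem.List.pyRange 0 n).foldl (fun score j =>
          if i == j then score else score + PySem.List.pyGetD (PySem.List.pyGetD values i []) j 0) 0
      d.insert (PySem.List.pyGetD sentences i "") score) rankings
  rankings.items

-- ===== PORT B =====
def rankSentences_alt (sentences : List String) : List (String × Int) :=
  let wordSets : List (PySem.Set String) :=
    sentences.map (fun s => PySem.Set.ofList ((PySem.Str.split? s " ").getD []))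
  let df : PySem.Dict String Int :=
    wordSets.foldl (fun d ws => ws.foldl (fun d w => d.insert w (d.getD w 0 + 1)) d) PySem.Dict.empty
  let rankings : PySem.Dict String Int :=
    (sentences.zip wordSets).foldl (fun d p =>
      d.insert p.1 (p.2.foldl (fun acc w => acc + (df.getD w 0 - 1)) 0)) PySem.Dict.empty
  rankings.items

-- ===== PRECONDITION & SPEC =====
def Spec_rankSentences (sentences : List String) (out : List (String × Int)) : Prop := out = rankSentences_alt sentences
instance (sentences : List String) (out : List (String × Int)) : Decidable (Spec_rankSentences sentences out) := by unfold Spec_rankSentences; infer_instance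

-- ===== CLAIM (what is proved, stated in full; the proofs are below) =====
def Claim_equal_rankSentences : Prop := ∀ (sentences : List String), Dom_rankSentences sentences → Spec_rankSentences sentences (rankSentences sentences)

-- ===== LEMMAS AND PROOFS =====

-- proof-only helpers naming the pieces of B
def wordsOf (s : String) : PySem.Set String := PySem.Set.ofList ((PySem.Str.split? s " ").getD [])

def dfOf (sentences : List String) : PySem.Dict String Int :=
  (sentences.map wordsOf).foldl (fun d ws => ws.foldl (fun d w => d.insert w (d.getD w 0 + 1)) d) PySem.Dict.empty

def scoreOf (df : PySem.Dict String Int) (s : String) : Int :=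
  (wordsOf s).foldl (fun acc w => acc + (df.getD w 0 - 1)) 0

-- assigning g j into slot j of a row, for all j < the row's length, yields the map of g
theorem rowFold (g : Nat → Int) : ∀ (k : Nat) (m : Nat) (row : List Int), k ≤ m → row.length = m →
    (List.range k).foldl (fun r j => r.set j (g j)) row = (List.range k).map g ++ row.drop k := by
  intro k
  induction k with
  | zero => simp
  | succ k ih =>
    intro m row hk hr
    rw [List.range_succ, List.foldl_append, List.map_append, ih m row (by omega) hr]
    have hkr : k < row.length := by omega
    rw [List.drop_eq_getElem_cons hkr]
    simp only [List.foldl_cons, List.foldl_nil, List.map_cons, List.map_nil]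
    have : ((List.range k).map g ++ row[k] :: row.drop (k+1)).set k (g k)
        = (List.range k).map g ++ g k :: row.drop (k+1) := by
      have hp : ((List.range k).map g).length = k := by simp
      rw [List.set_append_right _ _ (by omega)]
      simp only [hp, Nat.sub_self, List.set_cons_zero]
    rw [this]; simp

-- a loop writing into slot j of row i only, reads of row i commute out
theorem innerSet (g : Nat → Int) (i : Nat) : ∀ (k : Nat) (vs : List (List Int)), i < vs.length →
    (List.range k).foldl (fun vs j => vs.set i ((vs.getD i []).set j (g j))) vs
      = vs.set i ((List.range k).foldl (fun r j => r.set j (g j)) (vs.getD i [])) := by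
  intro k
  induction k with
  | zero => intro vs hi; simp [List.getD, List.getElem?_eq_getElem hi, List.set_getElem_self]
  | succ k ih =>
    intro vs hi
    rw [List.range_succ, List.foldl_append, ih vs hi, List.foldl_append]
    simp only [List.foldl_cons, List.foldl_nil]
    have h1 : ((vs.set i ((List.range k).foldl (fun r j => r.set j (g j)) (vs.getD i []))).getD i [])
        = (List.range k).foldl (fun r j => r.set j (g j)) (vs.getD i []) := by
      simp [List.getD, List.getElem?_set_self', List.getElem?_eq_getElem hi]
    rw [h1, List.set_set]

-- A's matrix-filling double loop produces the matrix of g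
theorem matFold (g : Nat → Nat → Int) (n : Nat) :
    ∀ (k : Nat) (vals : List (List Int)), k ≤ n → vals.length = n → (∀ r ∈ vals, r.length = n) →
    (List.range k).foldl (fun vs i =>
        (List.range n).foldl (fun vs j => vs.set i ((vs.getD i []).set j (g i j))) vs) vals
      = (List.range k).map (fun i => (List.range n).map (g i)) ++ vals.drop k := by
  intro k
  induction k with
  | zero => simp
  | succ k ih =>
    intro vals hk hl hr
    rw [List.range_succ, List.foldl_append, List.map_append, ih vals (by omega) hl hr]
    have hkv : k < vals.length := by omega
    rw [List.drop_eq_getElem_cons hkv]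
    simp only [List.foldl_cons, List.foldl_nil, List.map_cons, List.map_nil]
    have hp : ((List.range k).map (fun i => (List.range n).map (g i))).length = k := by simp
    rw [innerSet (g k) k n _ (by simp; omega)]
    have hget : ((List.range k).map (fun i => (List.range n).map (g i)) ++ vals[k] :: vals.drop (k+1)).getD k []
        = vals[k] := by
      simp [List.getD, List.getElem?_append_right, hp, List.getElem?_eq_getElem hkv]
    rw [hget, rowFold (g k) n n vals[k] le_rfl (hr vals[k] (List.getElem_mem hkv))]
    rw [List.set_append_right _ _ (by omega)]
    simp only [hp, Nat.sub_self, List.set_cons_zero]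
    rw [List.drop_eq_nil_of_le (le_of_eq (hr vals[k] (List.getElem_mem hkv)))]
    simp

-- summing g over range n with the k-th term zeroed
theorem sumHole (g : Nat → Int) : ∀ (n k : Nat), k < n →
    ((List.range n).map (fun j => if k = j then 0 else g j)).sum = ((List.range n).map g).sum - g k := by
  intro n
  induction n with
  | zero => omega
  | succ n ih =>
    intro k hk
    rw [List.range_succ]
    by_cases h : k = n
    · subst h
      have : (List.range k).map (fun j => if k = j then 0 else g j) = (List.range k).map g := by
        apply List.map_congr_left
        intro j hj
        have : j < k := List.mem_range.mp hj
        simp [show k ≠ j by omega]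
      simp [this]
    · have hk' : k < n := by omega
      simp only [List.map_append, List.sum_append, ih k hk']
      simp [h]
      ring

-- exchanging the two sums of a double sum over lists
theorem sumSwap {α β : Type} (L : List α) (M : List β) (F : α → β → Int) :
    (L.map (fun j => (M.map (F j)).sum)).sum = (M.map (fun w => (L.map (fun j => F j w)).sum)).sum := by
  induction L with
  | nil => simp
  | cons a L ih =>
    simp only [List.map_cons, List.sum_cons, ih]
    rw [← PySem.List.sum_map_add_int]

-- reading a list through range-indexed getD is the list itself
theorem mapRangeGetD {α β : Type} (l : List α) (d : α) (F : α → β) :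
    (List.range l.length).map (fun k => F (l.getD k d)) = l.map F := by
  apply List.ext_getElem
  · simp
  · intro i h1 h2
    have : i < l.length := by simpa using h2
    simp_all [List.getD]

-- an intersection size as a 0/1 sum over the first word set
theorem calc_eq (s t : String) :
    calcIntersection s t = ((wordsOf s).map (fun w => if (wordsOf t).contains w then (1:Int) else 0)).sum := by
  simp only [calcIntersection, wordsOf, PySem.Set.inter, PySem.Set.len, PySem.Set.contains]
  rw [← List.countP_eq_length_filter, ← PySem.List.sum_map_ite_one_zero]
  simp

theorem calc_self (s : String) : calcIntersection s s = ((wordsOf s).length : Int) := by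
  rw [calc_eq]
  have h : ∀ w ∈ wordsOf s, (if (wordsOf s).contains w then (1:Int) else 0) = 1 := by
    intro w hw; simp [PySem.Set.contains, hw]
  rw [List.map_congr_left h, PySem.List.sum_map_const_int]
  ring

-- a word-set's count of a word is its 0/1 membership indicator
theorem count_indicator (ws : PySem.Set String) (hnd : ws.Nodup) (w : String) :
    ((ws.count w : Nat) : Int) = if ws.contains w then (1:Int) else 0 := by
  by_cases h : w ∈ ws
  · simp [PySem.Set.contains, h, List.count_eq_one_of_mem hnd h]
  · simp [PySem.Set.contains, h, List.count_eq_zero_of_not_mem h]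

-- the document-frequency dictionary counts the word sets containing w
theorem dfChar (sentences : List String) (w : String) :
    (dfOf sentences).getD w 0 = ((sentences.map wordsOf).map (fun ws => ((ws.count w : Nat) : Int))).sum := by
  unfold dfOf
  rw [← List.foldl_flatten, PySem.Dict.getD_foldl_insert_add_one, List.count_flatten]
  push_cast [List.map_map]
  simp [PySem.Dict.getD, PySem.Dict.get?, PySem.Dict.empty, Function.comp_def]

-- the heart: A's row sum without the diagonal equals B's df-based score
theorem scoreChar (sentences : List String) (k : Nat) :
    ((List.range sentences.length).map (fun j => calcIntersection (sentences.getD k "") (sentences.getD j ""))).sum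
      - calcIntersection (sentences.getD k "") (sentences.getD k "")
    = scoreOf (dfOf sentences) (sentences.getD k "") := by
  have h1 : (List.range sentences.length).map
        (fun j => calcIntersection (sentences.getD k "") (sentences.getD j ""))
      = (List.range sentences.length).map (fun j =>
          ((wordsOf (sentences.getD k "")).map
            (fun w => if (wordsOf (sentences.getD j "")).contains w then (1:Int) else 0)).sum) :=
    List.map_congr_left (fun j _ => calc_eq _ _)
  rw [h1, sumSwap, calc_self]
  have h2 : ∀ w : String, ((List.range sentences.length).map
        (fun j => if (wordsOf (sentences.getD j "")).contains w then (1:Int) else 0)).sum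
      = (dfOf sentences).getD w 0 := by
    intro w
    rw [mapRangeGetD sentences "" (fun t => if (wordsOf t).contains w then (1:Int) else 0),
      dfChar, List.map_map]
    congr 1
    apply List.map_congr_left
    intro t _
    simp only [Function.comp_def]
    have hnd : (wordsOf t).Nodup := by unfold wordsOf; exact PySem.Set.nodup_ofList _
    rw [count_indicator (wordsOf t) hnd w]
  rw [List.map_congr_left (fun w _ => h2 w)]
  unfold scoreOf
  rw [PySem.List.foldl_add, zero_add]
  have h3 : (wordsOf (sentences.getD k "")).map (fun w => (dfOf sentences).getD w 0 - 1)
      = (wordsOf (sentences.getD k "")).map (fun w => (dfOf sentences).getD w 0 + (-1)) := by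
    simp [sub_eq_add_neg]
  rw [h3, PySem.List.sum_map_add_int, PySem.List.sum_map_const_int]
  ring

theorem aChar (sentences : List String) :
    rankSentences sentences
      = (sentences.foldl (fun d s => d.insert s (scoreOf (dfOf sentences) s)) PySem.Dict.empty).items := by
  simp only [rankSentences, PySem.List.pyRange_zero_natCast, List.foldl_map, List.map_map,
    PySem.List.pySetD_natCast, PySem.List.pyGetD_natCast]
  rw [matFold (fun i j => calcIntersection (sentences.getD i "") (sentences.getD j ""))
      sentences.length sentences.length _ le_rfl (by simp)
      (by intro r hr; rw [List.mem_map] at hr; obtain ⟨a, -, rfl⟩ := hr; simp)]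
  rw [List.drop_eq_nil_of_le (by simp), List.append_nil]
  congr 1
  rw [PySem.List.foldl_congr_mem _ _
      (fun d k => d.insert (sentences.getD k "") (scoreOf (dfOf sentences) (sentences.getD k ""))) _ ?hbody]
  case hbody =>
    intro d k hkmem
    have hkN : k < sentences.length := List.mem_range.mp hkmem
    have hVk : ((List.range sentences.length).map (fun i => (List.range sentences.length).map
          (fun j => calcIntersection (sentences.getD i "") (sentences.getD j "")))).getD k []
        = (List.range sentences.length).map
            (fun j => calcIntersection (sentences.getD k "") (sentences.getD j "")) := by
      simp [List.getD, List.getElem?_map, List.getElem?_range hkN]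
    rw [hVk]
    congr 1
    rw [PySem.List.foldl_congr_mem _ _
        (fun sc j => sc + (if k = j then 0 else
          calcIntersection (sentences.getD k "") (sentences.getD j ""))) _ ?hinner]
    case hinner =>
      intro sc j hjmem
      have hjN : j < sentences.length := List.mem_range.mp hjmem
      by_cases h : k = j
      · simp [h]
      · have hbeq : ((k : Int) == (j : Int)) = false := by simp [h]
        simp [hbeq, h, List.getD, List.getElem?_map, List.getElem?_range hjN]
    rw [PySem.List.foldl_add, zero_add, sumHole _ _ _ hkN, scoreChar sentences k]
  have hms : (List.range sentences.length).map (fun k => sentences.getD k "") = sentences := by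
    simpa using mapRangeGetD sentences "" id
  rw [← List.foldl_map (f := fun k => sentences.getD k "")
      (g := fun (d : PySem.Dict String Int) s => d.insert s (scoreOf (dfOf sentences) s)), hms]

theorem bChar (sentences : List String) :
    rankSentences_alt sentences
      = (sentences.foldl (fun d s => d.insert s (scoreOf (dfOf sentences) s)) PySem.Dict.empty).items := by
  simp only [rankSentences_alt]
  have hz : sentences.zip (sentences.map (fun s => PySem.Set.ofList ((PySem.Str.split? s " ").getD [])))
      = sentences.map (fun s => (s, wordsOf s)) := by
    nth_rewrite 1 [← List.map_id sentences]
    rw [List.zip_map']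
    simp only [id]
    rfl
  rw [hz, List.foldl_map]
  rfl

-- ===== VERDICT (by name: the statement is the Claim_ definition above) =====
theorem rankSentences_spec : Claim_equal_rankSentences := by
  intro sentences _
  unfold Spec_rankSentences
  rw [aChar, bChar]
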